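-- pv_equiv track=rewrite | github.com/JimXiongGM/Interactive-KBQA | tool/client_freebase.py | _remove_filter_clauses
-- ===== SOURCE A (Python) =====
-- def _remove_filter_clauses(sparql):
--     filter_clauses = []
--     result = ""
--     i = 0
--     while i < len(sparql):
--         if sparql[i : i + 6].lower() == "filter":
--             s = i
--             depth = 0
--             while i < len(sparql):
--                 if sparql[i] == "(":
--                     depth += 1
--                 elif sparql[i] == ")":
--                     depth -= 1
--                     if depth == 0:
--                         i += 1
--                         e = i
--                         filter_clauses.append(sparql[s:e])
--                         break
--                 i += 1
--
--         else:
--             result += sparql[i]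
--             i += 1
--     return result, filter_clauses
-- ===== SOURCE B (Python) =====
-- def _filter_end(sparql, i):
--     depth = 0
--     for j in range(i, len(sparql)):
--         c = sparql[j]
--         if c == "(":
--             depth += 1
--         elif c == ")":
--             depth -= 1
--             if depth == 0:
--                 return j + 1
--     return None
--
--
-- def _remove_filter_clauses(sparql):
--     lower = sparql.lower()
--     parts = []
--     filter_clauses = []
--     pos = 0
--     while True:
--         idx = lower.find("filter", pos)
--         if idx == -1:
--             parts.append(sparql[pos:])
--             break
--         parts.append(sparql[pos:idx])
--         end = _filter_end(sparql, idx)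
--         if end is None:
--             break
--         filter_clauses.append(sparql[idx:end])
--         pos = end
--     return "".join(parts), filter_clauses
-- ===== Notes on version B (the rewrite author's own statement) =====
-- stated objective: faster
-- what changed: Instead of testing a lowercased 6-char slice at every index and growing the result string one character at a time, B lowercases once, jumps between FILTER occurrences with str.find, copies whole inter-clause slices into a parts list joined once at the end, and delegates the clause end to a separate paren-depth helper.
import Mathlib
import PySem

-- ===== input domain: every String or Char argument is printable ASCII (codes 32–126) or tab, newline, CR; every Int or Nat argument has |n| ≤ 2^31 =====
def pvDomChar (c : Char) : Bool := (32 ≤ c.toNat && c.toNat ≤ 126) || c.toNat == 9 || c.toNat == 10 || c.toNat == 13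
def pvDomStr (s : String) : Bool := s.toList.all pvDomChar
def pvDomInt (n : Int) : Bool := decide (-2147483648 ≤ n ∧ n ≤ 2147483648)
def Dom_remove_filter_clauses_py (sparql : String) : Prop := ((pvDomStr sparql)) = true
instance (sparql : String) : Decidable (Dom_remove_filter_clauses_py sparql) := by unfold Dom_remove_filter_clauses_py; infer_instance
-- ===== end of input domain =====

-- B replaces A's per-character scan-and-concatenate by a find-driven loop over whole slices
-- joined once at the end (objective: faster; a timing run measured the speedup).


-- ===== PORT A =====

-- ===== PORT A =====
-- A's inner while loop (fuel = remaining characters, cs.length - i at every call site,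
-- so fuel 0 is exactly the loop exit i = len): advance i tracking paren depth; on the
-- depth-0 break return (new i, the clause sparql[s:i+1]); otherwise (i, none).
def pvAInner (cs : List Char) (fuel i s : Nat) (depth : Int) : Nat × Option (List Char) :=
  match fuel with
  | 0 => (i, none)
  | fuel+1 =>
    if h : i < cs.length then
      if cs[i] = '(' then pvAInner cs fuel (i+1) s (depth+1)
      else if cs[i] = ')' then
        if depth - 1 = 0 then
          (i+1, some (PySem.Chars.slice cs (some (s:Int)) (some ((i:Int)+1))))
        else pvAInner cs fuel (i+1) s (depth-1)
      else pvAInner cs fuel (i+1) s depth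
    else (i, none)

-- A's outer while loop, character by character (i strictly grows each iteration, so
-- fuel = cs.length at i = 0 never runs out; at fuel 0 i = len and the loop exit value
-- (result, clauses) is returned, as in the else-branch)
def pvAOuter (cs : List Char) (fuel i : Nat) (result : List Char) (clauses : List (List Char)) :
    List Char × List (List Char) :=
  match fuel with
  | 0 => (result, clauses)
  | fuel+1 =>
    if h : i < cs.length then
      if PySem.Chars.lower (PySem.Chars.slice cs (some (i:Int)) (some ((i:Int)+6))) = "filter".toList then
        match pvAInner cs (cs.length - i) i i 0 with
        | (i', some cl) => pvAOuter cs fuel i' result (clauses ++ [cl])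
        | (_, none) => (result, clauses)
      else
        pvAOuter cs fuel (i+1) (result ++ [cs[i]]) clauses
    else (result, clauses)

def remove_filter_clauses_py (sparql : String) : String × List String :=
  let cs := sparql.toList
  let r := pvAOuter cs cs.length 0 [] []
  (String.ofList r.1, r.2.map String.ofList)

-- ===== PORT B =====

-- ===== PORT B =====
-- Source B's _filter_end for-loop over range(i, len) (fuel = number of remaining indices):
-- first j with a depth-0-restoring ')' gives j+1, else None
def pvBEnd (cs : List Char) (fuel j : Nat) (depth : Int) : Option Nat :=
  match fuel with
  | 0 => none
  | fuel+1 =>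
    if h : j < cs.length then
      if cs[j] = '(' then pvBEnd cs fuel (j+1) (depth+1)
      else if cs[j] = ')' then
        if depth - 1 = 0 then some (j+1) else pvBEnd cs fuel (j+1) (depth-1)
      else pvBEnd cs fuel (j+1) depth
    else none

-- Source B's while-True loop: jump from FILTER occurrence to FILTER occurrence via find
-- (pos strictly grows each iteration, so fuel = cs.length at pos = 0 never runs out;
-- the fuel-0 value is the break-branch value, which is what pos = len would produce)
def pvBLoop (cs lower : List Char) (fuel pos : Nat) (parts clauses : List (List Char)) :
    List (List Char) × List (List Char) :=
  match fuel with
  | 0 => (parts ++ [PySem.Chars.slice cs (some (pos:Int)) none], clauses)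
  | fuel+1 =>
    if PySem.Chars.findFrom lower "filter".toList (pos:Int) none = -1 then
      (parts ++ [PySem.Chars.slice cs (some (pos:Int)) none], clauses)
    else
      match pvBEnd cs
          (cs.length - (PySem.Chars.findFrom lower "filter".toList (pos:Int) none).toNat)
          (PySem.Chars.findFrom lower "filter".toList (pos:Int) none).toNat 0 with
      | none =>
        (parts ++ [PySem.Chars.slice cs (some (pos:Int))
          (some (((PySem.Chars.findFrom lower "filter".toList (pos:Int) none).toNat : Nat) : Int))], clauses)
      | some e =>
        pvBLoop cs lower fuel e
          (parts ++ [PySem.Chars.slice cs (some (pos:Int))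
            (some (((PySem.Chars.findFrom lower "filter".toList (pos:Int) none).toNat : Nat) : Int))])
          (clauses ++ [PySem.Chars.slice cs
            (some (((PySem.Chars.findFrom lower "filter".toList (pos:Int) none).toNat : Nat) : Int))
            (some ((e : Nat) : Int))])

def remove_filter_clauses_py_alt (sparql : String) : String × List String :=
  let cs := sparql.toList
  let r := pvBLoop cs (PySem.Chars.lower cs) cs.length 0 [] []
  (String.ofList r.1.flatten, r.2.map String.ofList)

-- ===== PRECONDITION & SPEC =====
def Spec_remove_filter_clauses_py (sparql : String) (out : String × List String) : Prop := out = remove_filter_clauses_py_alt sparql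
instance (sparql : String) (out : String × List String) : Decidable (Spec_remove_filter_clauses_py sparql out) := by unfold Spec_remove_filter_clauses_py; infer_instance

-- ===== CLAIM (what is proved, stated in full; the proofs are below) =====
def Claim_equal_remove_filter_clauses_py : Prop := ∀ (sparql : String), Dom_remove_filter_clauses_py sparql → Spec_remove_filter_clauses_py sparql (remove_filter_clauses_py sparql)

-- ===== LEMMAS AND PROOFS =====

theorem pvLowerLen (cs : List Char) : (PySem.Chars.lower cs).length = cs.length := by
  show (cs.map PySem.Chars.lowerChar).length = cs.length
  simp

theorem pvFilterAt_iff (cs : List Char) (i : Nat) :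
    (PySem.Chars.lower (PySem.Chars.slice cs (some (i:Int)) (some ((i:Int)+6))) = "filter".toList)
      ↔ "filter".toList <+: (PySem.Chars.lower cs).drop i := by
  have h6 : ((i:Int)+6) = ((i+6 : Nat) : Int) := by push_cast; ring
  rw [h6, List.prefix_iff_eq_take]
  show PySem.Chars.lower (PySem.List.slice cs (some (i:Int)) (some ((i+6:Nat):Int))) = _ ↔ _
  rw [PySem.List.slice_natCast]
  show ((cs.drop i).take (i+6-i)).map PySem.Chars.lowerChar = _
    ↔ _ = ((cs.map PySem.Chars.lowerChar).drop i).take ("filter".toList.length)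
  have h2 : i + 6 - i = 6 := by omega
  have hlen : ("filter".toList).length = 6 := by decide
  rw [h2, hlen, List.map_take, List.map_drop]
  constructor <;> intro h <;> simp_all

theorem pvInfix_iff (sub t : List Char) (pos : Nat) :
    sub <:+: t.drop pos ↔ ∃ j, pos ≤ j ∧ sub <+: t.drop j := by
  rw [← PySem.Chars.isIn_iff_infix, ← PySem.Chars.exists_prefix_drop_iff_isIn]
  constructor
  · rintro ⟨j, hj⟩
    refine ⟨pos + j, by omega, ?_⟩
    rwa [List.drop_drop] at hj
  · rintro ⟨j, hj1, hj2⟩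
    refine ⟨j - pos, ?_⟩
    rw [List.drop_drop, show pos + (j - pos) = j from by omega]
    exact hj2

-- a found clause end lies in (j, len]
theorem pvBEnd_bounds (cs : List Char) : ∀ (n j : Nat) (d : Int) (e : Nat),
    pvBEnd cs n j d = some e → j < e ∧ e ≤ cs.length := by
  intro n
  induction n with
  | zero => intro j d e h; simp [pvBEnd] at h
  | succ m ih =>
    intro j d e h
    rw [pvBEnd] at h
    by_cases hj : j < cs.length
    · rw [dif_pos hj] at h
      by_cases h1 : cs[j] = '('
      · rw [if_pos h1] at h; have := ih _ _ _ h; omega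
      · rw [if_neg h1] at h
        by_cases h2 : cs[j] = ')'
        · rw [if_pos h2] at h
          by_cases h3 : d - 1 = 0
          · rw [if_pos h3] at h; injection h with ha; omega
          · rw [if_neg h3] at h; have := ih _ _ _ h; omega
        · rw [if_neg h2] at h; have := ih _ _ _ h; omega
    · rw [dif_neg hj] at h; simp at h

-- the two inner paren-depth scanners compute the same exit point and clause
theorem pvInner_eq (cs : List Char) : ∀ (n j s : Nat) (d : Int), j + n = cs.length →
    pvAInner cs n j s d
      = (match pvBEnd cs n j d with
         | some e => (e, some (PySem.Chars.slice cs (some (s:Int)) (some ((e:Nat):Int))))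
         | none => (cs.length, none)) := by
  intro n
  induction n with
  | zero => intro j s d hj; simp [pvAInner, pvBEnd]; omega
  | succ m ih =>
    intro j s d hj
    have hjlt : j < cs.length := by omega
    rw [pvAInner, pvBEnd, dif_pos hjlt, dif_pos hjlt]
    by_cases h1 : cs[j] = '('
    · rw [if_pos h1, if_pos h1]; exact ih (j+1) s (d+1) (by omega)
    · rw [if_neg h1, if_neg h1]
      by_cases h2 : cs[j] = ')'
      · rw [if_pos h2, if_pos h2]
        by_cases h3 : d - 1 = 0
        · rw [if_pos h3, if_pos h3]
          have e1 : ((j:Int)+1) = ((j+1:Nat):Int) := by push_cast; ring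
          rw [e1]
        · rw [if_neg h3, if_neg h3]; exact ih (j+1) s (d-1) (by omega)
      · rw [if_neg h2, if_neg h2]; exact ih (j+1) s d (by omega)

-- past the end the outer loop returns its accumulators whatever the fuel
theorem pvAOuter_at_end (cs : List Char) (f i : Nat) (res : List Char)
    (cls : List (List Char)) (h : cs.length ≤ i) :
    pvAOuter cs f i res cls = (res, cls) := by
  cases f with
  | zero => rfl
  | succ m => rw [pvAOuter, dif_neg (by omega)]

-- A copies a FILTER-free region into result one character at a time
theorem pvSkipAux (cs : List Char) : ∀ (n pos fa : Nat) (res : List Char)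
    (cls : List (List Char)), pos + n ≤ cs.length → cs.length - pos ≤ fa →
    (∀ j, pos ≤ j → j < pos + n → ¬ ("filter".toList <+: (PySem.Chars.lower cs).drop j)) →
    pvAOuter cs fa pos res cls
      = pvAOuter cs (fa - n) (pos + n) (res ++ (cs.drop pos).take n) cls := by
  intro n
  induction n with
  | zero => intro pos fa res cls _ _ _; simp
  | succ m ih =>
    intro pos fa res cls h1 h2 h3
    have hpos : pos < cs.length := by omega
    obtain ⟨k, rfl⟩ : ∃ k, fa = k + 1 := ⟨fa - 1, by omega⟩
    rw [pvAOuter, dif_pos hpos,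
      if_neg (by rw [pvFilterAt_iff]; exact h3 pos le_rfl (by omega))]
    rw [ih (pos+1) k (res ++ [cs[pos]]) cls (by omega) (by omega)
      (fun j hj1 hj2 => h3 j (by omega) (by omega))]
    rw [show k - m = k + 1 - (m+1) by omega, show pos + 1 + m = pos + (m+1) by omega,
        show (cs.drop pos).take (m+1) = cs[pos] :: (cs.drop (pos+1)).take m from by
          rw [List.drop_eq_getElem_cons hpos, List.take_succ_cons]]
    simp

theorem pvSkip (cs : List Char) (pos idx fa : Nat) (res : List Char) (cls : List (List Char))
    (h1 : pos ≤ idx) (h2 : idx ≤ cs.length) (hf : cs.length - pos ≤ fa)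
    (h3 : ∀ j, pos ≤ j → j < idx → ¬ ("filter".toList <+: (PySem.Chars.lower cs).drop j)) :
    pvAOuter cs fa pos res cls
      = pvAOuter cs (fa - (idx - pos)) idx (res ++ (cs.drop pos).take (idx - pos)) cls := by
  obtain ⟨n, rfl⟩ : ∃ n, idx = pos + n := ⟨idx - pos, by omega⟩
  have := pvSkipAux cs n pos fa res cls (by omega) hf (by simpa using h3)
  simpa using this

-- main correspondence: A's loop from pos with accumulators equals B's loop from pos
theorem pvMain (cs : List Char) : ∀ (fb fa pos : Nat) (parts cls : List (List Char)),
    pos ≤ cs.length → cs.length - pos ≤ fa → cs.length - pos ≤ fb →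
    pvAOuter cs fa pos parts.flatten cls
      = ((pvBLoop cs (PySem.Chars.lower cs) fb pos parts cls).1.flatten,
         (pvBLoop cs (PySem.Chars.lower cs) fb pos parts cls).2) := by
  intro fb
  induction fb with
  | zero =>
    intro fa pos parts cls hpos hfa hfb
    have : pos = cs.length := by omega
    subst this
    rw [pvAOuter_at_end cs fa _ _ _ le_rfl]
    show _ = ((parts ++ [PySem.Chars.slice cs (some ((cs.length:Nat):Int)) none]).flatten, cls)
    have hsl : PySem.List.slice cs (some ((cs.length:Nat):Int)) none = cs.drop cs.length :=
      PySem.List.slice_from_natCast cs cs.length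
    simp [hsl]
  | succ b ih =>
    intro fa pos parts cls hpos hfa hfb
    have hk : pos ≤ (PySem.Chars.lower cs).length := (pvLowerLen cs) ▸ hpos
    rw [pvBLoop]
    by_cases hidx : PySem.Chars.findFrom (PySem.Chars.lower cs) "filter".toList (pos:Int) none = -1
    · rw [if_pos hidx]
      have hno : ¬ ("filter".toList <:+: (PySem.Chars.lower cs).drop pos) :=
        (PySem.Chars.findFrom_natCast_eq_neg_one_iff (PySem.Chars.lower cs) "filter".toList pos hk).mp hidx
      have hnoj : ∀ j, pos ≤ j → j < cs.length →
          ¬ ("filter".toList <+: (PySem.Chars.lower cs).drop j) := by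
        intro j hj _ hpre
        exact hno ((pvInfix_iff _ _ _).mpr ⟨j, hj, hpre⟩)
      rw [pvSkip cs pos cs.length fa _ _ hpos le_rfl hfa hnoj,
        pvAOuter_at_end cs _ _ _ _ le_rfl]
      have hsl : PySem.List.slice cs (some (pos:Int)) none = cs.drop pos :=
        PySem.List.slice_from_natCast cs pos
      have htk : (cs.drop pos).take (cs.length - pos) = cs.drop pos :=
        List.take_of_length_le (by simp)
      simp [hsl, htk]
    · rw [if_neg hidx]
      obtain ⟨hge, hpre, hbefore⟩ :=
        PySem.Chars.findFrom_natCast_spec (PySem.Chars.lower cs) "filter".toList pos hk hidx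
      set idx := (PySem.Chars.findFrom (PySem.Chars.lower cs) "filter".toList (pos:Int) none).toNat with hidxdef
      have hlen6 : idx + 6 ≤ cs.length := by
        have := hpre.length_le
        simp [pvLowerLen cs] at this
        omega
      have hposle : pos ≤ idx := by omega
      rw [pvSkip cs pos idx fa _ _ hposle (by omega) hfa (fun j ha hb => hbefore j ha hb)]
      obtain ⟨k, hfa'⟩ : ∃ k, fa - (idx - pos) = k + 1 := ⟨fa - (idx - pos) - 1, by omega⟩
      rw [hfa', pvAOuter, dif_pos (show idx < cs.length by omega),
        if_pos ((pvFilterAt_iff cs idx).mpr hpre),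
        pvInner_eq cs (cs.length - idx) idx idx 0 (by omega)]
      have hsl : PySem.List.slice cs (some (pos:Int)) (some ((idx:Nat):Int))
          = (cs.drop pos).take (idx - pos) := PySem.List.slice_natCast cs pos idx
      cases hend : pvBEnd cs (cs.length - idx) idx 0 with
      | none => simp [hsl]
      | some e =>
        have hb := pvBEnd_bounds cs (cs.length - idx) idx 0 e hend
        have hflat : (parts ++ [PySem.Chars.slice cs (some (pos:Int)) (some ((idx:Nat):Int))]).flatten
            = parts.flatten ++ (cs.drop pos).take (idx - pos) := by
          show (parts ++ [PySem.List.slice cs (some (pos:Int)) (some ((idx:Nat):Int))]).flatten = _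
          rw [hsl]; simp
        rw [← hflat]
        exact ih k e _ _ (by omega) (by omega) (by omega)

-- ===== VERDICT (by name: the statement is the Claim_ definition above) =====
theorem remove_filter_clauses_py_spec : Claim_equal_remove_filter_clauses_py := by
  intro sparql _
  show remove_filter_clauses_py sparql = remove_filter_clauses_py_alt sparql
  show (let cs := sparql.toList; let r := pvAOuter cs cs.length 0 [] [];
      (String.ofList r.1, r.2.map String.ofList))
    = (let cs := sparql.toList; let r := pvBLoop cs (PySem.Chars.lower cs) cs.length 0 [] [];
      (String.ofList r.1.flatten, r.2.map String.ofList))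
  simp only []
  have h := pvMain sparql.toList sparql.toList.length sparql.toList.length 0 [] []
    (Nat.zero_le _) (by omega) (by omega)
  simp only [List.flatten_nil] at h
  rw [h]
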